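-- pv_equiv track=rewrite | github.com/neoCheck/advent_of_code | 2024/12/day_12_2.py | find_region_not_in_my_region
-- ===== SOURCE A (Python) =====
-- T_POINT = tuple[int, int]
--
-- def find_region_not_in_my_region(available_regions: list[list[T_POINT]], point: T_POINT, x_len: int, y_len: int, my_region_index: int) -> int:
--     neighbor_points: list[T_POINT] = []
--     x, y = point
--     if x > 0:
--         neighbor_points.append((x - 1, y))
--     if y > 0:
--         neighbor_points.append((x, y - 1))
--     if x + 1 < x_len:
--         neighbor_points.append((x + 1, y))
--     if y + 1 < y_len:
--         neighbor_points.append((x, y + 1))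
--
--     for i, region in enumerate(available_regions):
--         if i != my_region_index:
--             for region_point in region:
--                 if region_point in neighbor_points:
--                     return i
--
--     return -1
-- ===== SOURCE B (Python) =====
-- def find_region_not_in_my_region(available_regions, point, x_len, y_len, my_region_index):
--     x, y = point
--     neighbor_points = []
--     if x > 0:
--         neighbor_points.append((x - 1, y))
--     if y > 0:
--         neighbor_points.append((x, y - 1))
--     if x + 1 < x_len:
--         neighbor_points.append((x + 1, y))
--     if y + 1 < y_len:
--         neighbor_points.append((x, y + 1))
--     point_to_regions = {}
--     for i, region in enumerate(available_regions):
--         for p in region: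
--             point_to_regions[p] = point_to_regions.get(p, []) + [i]
--     candidates = [i for p in neighbor_points
--                   for i in point_to_regions.get(p, [])
--                   if i != my_region_index]
--     return min(candidates) if candidates else -1
-- ===== Notes on version B (the rewrite author's own statement) =====
-- stated objective: alternative
-- what changed: Replaces A's early-return scan over regions (inner linear scan of each region against the neighbor list) by a point-to-region-indices dictionary built once over all regions, then takes the minimum qualifying index gathered over the four neighbor points; 'first region in enumeration order' equals 'minimum qualifying index'.
import Mathlib
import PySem

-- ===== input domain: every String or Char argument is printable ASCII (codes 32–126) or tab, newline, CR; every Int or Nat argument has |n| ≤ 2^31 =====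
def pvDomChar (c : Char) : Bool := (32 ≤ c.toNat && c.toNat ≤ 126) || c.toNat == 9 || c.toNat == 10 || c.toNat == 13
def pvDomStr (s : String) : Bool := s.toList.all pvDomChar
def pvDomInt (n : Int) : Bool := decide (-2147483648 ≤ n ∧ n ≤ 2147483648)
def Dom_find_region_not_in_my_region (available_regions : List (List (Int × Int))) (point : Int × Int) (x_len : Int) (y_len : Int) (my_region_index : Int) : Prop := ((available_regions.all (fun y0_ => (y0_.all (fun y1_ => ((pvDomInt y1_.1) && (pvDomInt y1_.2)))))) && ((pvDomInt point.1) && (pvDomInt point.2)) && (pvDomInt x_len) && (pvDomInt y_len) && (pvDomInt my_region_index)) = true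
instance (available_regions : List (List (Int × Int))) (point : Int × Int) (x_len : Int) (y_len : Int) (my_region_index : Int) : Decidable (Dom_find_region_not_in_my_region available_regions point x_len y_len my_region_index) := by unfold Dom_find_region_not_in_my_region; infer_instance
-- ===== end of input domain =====

-- B replaces A's early-return scan over regions (with an inner linear scan of each region)
-- by a point→region-indices dictionary built once, followed by taking the minimum qualifying
-- index over the neighbor points; objective: alternative (same asymptotic cost, no early exit).

-- the neighbor-point construction, identical in both Pythons (shared helper)
def pvNeighborPoints (point : Int × Int) (x_len : Int) (y_len : Int) : List (Int × Int) :=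
  let x := point.1
  let y := point.2
  let np : List (Int × Int) := []
  let np := if x > 0 then np ++ [(x - 1, y)] else np
  let np := if y > 0 then np ++ [(x, y - 1)] else np
  let np := if x + 1 < x_len then np ++ [(x + 1, y)] else np
  let np := if y + 1 < y_len then np ++ [(x, y + 1)] else np
  np

-- ===== PORT A =====
-- inner loop: 'for region_point in region: if region_point in neighbor_points: return i'
def pvAInner (neighbor_points : List (Int × Int)) : List (Int × Int) → Bool
  | [] => false
  | q :: rest => if q ∈ neighbor_points then true else pvAInner neighbor_points rest

-- outer loop: 'for i, region in enumerate(available_regions): …'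
def pvALoop (my_region_index : Int) (neighbor_points : List (Int × Int)) :
    List (Int × List (Int × Int)) → Int
  | [] => -1
  | (i, region) :: rest =>
    if i ≠ my_region_index then
      if pvAInner neighbor_points region then i
      else pvALoop my_region_index neighbor_points rest
    else pvALoop my_region_index neighbor_points rest

def find_region_not_in_my_region (available_regions : List (List (Int × Int))) (point : Int × Int) (x_len : Int) (y_len : Int) (my_region_index : Int) : Int :=
  let neighbor_points := pvNeighborPoints point x_len y_len
  pvALoop my_region_index neighbor_points (PySem.List.enumerate available_regions 0)

-- ===== PORT B =====
-- 'point_to_regions[p] = point_to_regions.get(p, []) + [i]' for every i, p — a dict built once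
def pvPointToRegions (available_regions : List (List (Int × Int))) :
    PySem.Dict (Int × Int) (List Int) :=
  (PySem.List.enumerate available_regions 0).foldl
    (fun d ir => ir.2.foldl (fun d p => d.modify p [] (fun l => l ++ [ir.1])) d)
    PySem.Dict.empty

-- 'candidates = [i for p in neighbor_points for i in point_to_regions.get(p, []) if i != my_region_index]'
def pvCandidates (available_regions : List (List (Int × Int))) (neighbor_points : List (Int × Int))
    (my_region_index : Int) : List Int :=
  neighbor_points.flatMap
    (fun p => ((pvPointToRegions available_regions).getD p []).filter (fun i => i ≠ my_region_index))

def find_region_not_in_my_region_alt (available_regions : List (List (Int × Int))) (point : Int × Int) (x_len : Int) (y_len : Int) (my_region_index : Int) : Int :=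
  let neighbor_points := pvNeighborPoints point x_len y_len
  let candidates := pvCandidates available_regions neighbor_points my_region_index
  match PySem.List.min? candidates (fun z => z) with
  | some m => m
  | none => -1

-- ===== PRECONDITION & SPEC =====
def Spec_find_region_not_in_my_region (available_regions : List (List (Int × Int))) (point : Int × Int) (x_len : Int) (y_len : Int) (my_region_index : Int) (out : Int) : Prop := out = find_region_not_in_my_region_alt available_regions point x_len y_len my_region_index
instance (available_regions : List (List (Int × Int))) (point : Int × Int) (x_len : Int) (y_len : Int) (my_region_index : Int) (out : Int) : Decidable (Spec_find_region_not_in_my_region available_regions point x_len y_len my_region_index out) := by unfold Spec_find_region_not_in_my_region; infer_instance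

-- ===== CLAIM (what is proved, stated in full; the proofs are below) =====
def Claim_equal_find_region_not_in_my_region : Prop := ∀ (available_regions : List (List (Int × Int))) (point : Int × Int) (x_len : Int) (y_len : Int) (my_region_index : Int), Dom_find_region_not_in_my_region available_regions point x_len y_len my_region_index → Spec_find_region_not_in_my_region available_regions point x_len y_len my_region_index (find_region_not_in_my_region available_regions point x_len y_len my_region_index)

-- ===== LEMMAS AND PROOFS =====

-- an enumerated pair qualifies: its index differs from my_region_index and its region meets the neighbor set
def pvQual (my_region_index : Int) (neighbor_points : List (Int × Int))
    (ir : Int × List (Int × Int)) : Prop :=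
  ir.1 ≠ my_region_index ∧ ∃ q ∈ ir.2, q ∈ neighbor_points

lemma pvAInner_iff (nbrs : List (Int × Int)) (r : List (Int × Int)) :
    pvAInner nbrs r = true ↔ ∃ q ∈ r, q ∈ nbrs := by
  induction r with
  | nil => simp [pvAInner]
  | cons q rest ih =>
    by_cases h : q ∈ nbrs <;> simp [pvAInner, h, ih]

lemma pvALoop_spec (my : Int) (nbrs : List (Int × Int))
    (L : List (Int × List (Int × Int))) (hpw : L.Pairwise (fun a b => a.1 < b.1)) :
    (pvALoop my nbrs L = -1 ∧ ∀ ir ∈ L, ¬ pvQual my nbrs ir) ∨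
    (∃ ir ∈ L, pvQual my nbrs ir ∧ pvALoop my nbrs L = ir.1 ∧
      ∀ ir' ∈ L, pvQual my nbrs ir' → ir.1 ≤ ir'.1) := by
  induction L with
  | nil => exact Or.inl ⟨rfl, by simp⟩
  | cons e rest ih =>
    obtain ⟨i, region⟩ := e
    have hpw' := (List.pairwise_cons.mp hpw)
    by_cases hq : pvQual my nbrs (i, region)
    · refine Or.inr ⟨(i, region), by simp, hq, ?_, ?_⟩
      · have hinner : pvAInner nbrs region = true := (pvAInner_iff nbrs region).mpr hq.2
        simp [pvALoop, hq.1, hinner]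
      · intro ir' hmem hq'
        rcases List.mem_cons.mp hmem with h | h
        · subst h; exact le_refl _
        · exact le_of_lt (hpw'.1 ir' h)
    · have hstep : pvALoop my nbrs ((i, region) :: rest) = pvALoop my nbrs rest := by
        by_cases hne : i ≠ my
        · have hinner : pvAInner nbrs region = false := by
            rcases h : pvAInner nbrs region with _ | _
            · rfl
            · exact absurd ⟨hne, (pvAInner_iff nbrs region).mp h⟩ hq
          simp [pvALoop, hne, hinner]
        · simp [pvALoop, hne]
      rcases ih hpw'.2 with ⟨hv, hnone⟩ | ⟨ir, hmem, hq', hv, hmin⟩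
      · refine Or.inl ⟨hstep.trans hv, ?_⟩
        intro ir hmem
        rcases List.mem_cons.mp hmem with h' | h'
        · subst h'; exact hq
        · exact hnone ir h'
      · refine Or.inr ⟨ir, List.mem_cons_of_mem _ hmem, hq', hstep.trans hv, ?_⟩
        intro ir' hmem' hq''
        rcases List.mem_cons.mp hmem' with h' | h'
        · subst h'; exact absurd hq'' hq
        · exact hmin ir' h' hq''

lemma pvGetD_foldl_region (r : List (Int × Int)) (i : Int)
    (d : PySem.Dict (Int × Int) (List Int)) (p : Int × Int) :
    (r.foldl (fun d q => d.modify q [] (fun l => l ++ [i])) d).getD p [] =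
      d.getD p [] ++ List.replicate (r.count p) i := by
  induction r generalizing d with
  | nil => simp
  | cons q rest ih =>
    rw [List.foldl_cons, ih, PySem.Dict.getD_modify]
    by_cases h : p = q
    · subst h
      simp [List.replicate_succ]
    · have h' : ¬ q = p := fun e => h e.symm
      simp [h, h']

lemma pvGetD_build (L : List (Int × List (Int × Int)))
    (d : PySem.Dict (Int × Int) (List Int)) (p : Int × Int) :
    (L.foldl (fun d ir => ir.2.foldl (fun d q => d.modify q [] (fun l => l ++ [ir.1])) d) d).getD p [] =
      d.getD p [] ++ L.flatMap (fun ir => List.replicate (ir.2.count p) ir.1) := by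
  induction L generalizing d with
  | nil => simp
  | cons e rest ih =>
    rw [List.foldl_cons, ih, pvGetD_foldl_region]
    simp

lemma pvMem_candidates (regions : List (List (Int × Int))) (nbrs : List (Int × Int))
    (my j : Int) :
    (j ∈ pvCandidates regions nbrs my) ↔
      (j ≠ my ∧ ∃ p ∈ nbrs, ∃ ir ∈ PySem.List.enumerate regions 0, ir.1 = j ∧ p ∈ ir.2) := by
  unfold pvCandidates pvPointToRegions
  simp only [List.mem_flatMap, List.mem_filter, pvGetD_build, PySem.Dict.getD_empty,
    List.nil_append, List.mem_replicate, decide_eq_true_eq]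
  constructor
  · rintro ⟨p, hp, ⟨ir, hir, hcnt, rfl⟩, hne⟩
    exact ⟨hne, p, hp, ir, hir, rfl, List.count_pos_iff.mp (Nat.pos_of_ne_zero hcnt)⟩
  · rintro ⟨hne, p, hp, ir, hir, rfl, hpin⟩
    exact ⟨p, hp, ⟨ir, hir, Nat.pos_iff_ne_zero.mp (List.count_pos_iff.mpr hpin), rfl⟩, hne⟩

lemma pvEnum_pairwise (regions : List (List (Int × Int))) :
    (PySem.List.enumerate regions 0).Pairwise (fun a b => a.1 < b.1) := by
  have h := PySem.List.map_fst_enumerate regions 0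
  have hpr := PySem.List.pairwise_lt_pyRange_one (a := 0) (b := 0 + (regions.length : Int))
  rw [← h] at hpr
  exact (List.pairwise_map).mp hpr

-- ===== VERDICT (by name: the statement is the Claim_ definition above) =====
theorem find_region_not_in_my_region_spec : Claim_equal_find_region_not_in_my_region := by
  intro regions point x_len y_len my _
  unfold Spec_find_region_not_in_my_region
  unfold find_region_not_in_my_region find_region_not_in_my_region_alt
  set nbrs := pvNeighborPoints point x_len y_len with hnbrs
  set cands := pvCandidates regions nbrs my with hcands
  have hmemc := fun j => pvMem_candidates regions nbrs my j
  have hA := pvALoop_spec my nbrs (PySem.List.enumerate regions 0) (pvEnum_pairwise regions)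
  rcases hmin : PySem.List.min? cands (fun z => z) with _ | m
  · -- candidates empty: no qualifying pair exists, A returns -1
    have hnil : cands = [] := (PySem.List.min?_eq_none_iff _ _).mp hmin
    rcases hA with ⟨hv, _⟩ | ⟨ir, hmem, hq, hv, _⟩
    · simp only [show (PySem.List.min? (pvCandidates regions nbrs my) fun z => z) = none from hmin, hv]
    · exfalso
      obtain ⟨hne, q, hqmem, hqn⟩ := hq
      have : ir.1 ∈ cands := (hmemc ir.1).mpr ⟨hne, q, hqn, ir, hmem, rfl, hqmem⟩
      simp [hnil] at this
  · -- candidates nonempty: A returns the minimum candidate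
    have hmmem : m ∈ cands := PySem.List.min?_mem hmin
    have hmmin : ∀ y ∈ cands, m ≤ y := fun y hy => PySem.List.min?_isMin hmin y hy
    obtain ⟨hne, p, hp, ir0, hir0, hir0j, hpin⟩ := (hmemc m).mp hmmem
    rcases hA with ⟨_, hnone⟩ | ⟨ir, hmem, hq, hv, hminA⟩
    · exact absurd ⟨hir0j ▸ hne, p, hpin, hp⟩ (hnone ir0 hir0)
    · have h1 : ir.1 ∈ cands := by
        obtain ⟨hne', q, hqmem, hqn⟩ := hq
        exact (hmemc ir.1).mpr ⟨hne', q, hqn, ir, hmem, rfl, hqmem⟩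
      have h2 : m ≤ ir.1 := hmmin _ h1
      have h3 : ir.1 ≤ m := hminA ir0 hir0 ⟨hir0j ▸ hne, p, hpin, hp⟩ |>.trans_eq hir0j
      simp only [show (PySem.List.min? (pvCandidates regions nbrs my) fun z => z) = some m from hmin, hv]
      omega
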